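-- pv_equiv track=rewrite | github.com/bthakr1/Faster_Pandas | educativeCourse.py | findNameSalary
-- ===== SOURCE A (Python) =====
-- dict1 = {'Ten': 10, 'Twenty': 20, 'Thirty': 30}
--
-- def findNameSalary(dict1):
--
--     name = []
--     salary = []
--
--     for i , v in dict1.items():
--         if i == 'name':
--             name.append(v)
--         elif i == 'salary':
--             salary.append(v)
--
--     return name,salary
-- ===== SOURCE B (Python) =====
-- def findNameSalary(dict1):
--     name = [dict1['name']] if 'name' in dict1 else []
--     salary = [dict1['salary']] if 'salary' in dict1 else []
--     return name, salary
-- ===== Notes on version B (the rewrite author's own statement) =====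
-- stated objective: idiomatic
-- what changed: Replaces the full scan over all items with per-item branching by two direct key lookups ('name' and 'salary'), so the loop disappears.
import Mathlib
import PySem

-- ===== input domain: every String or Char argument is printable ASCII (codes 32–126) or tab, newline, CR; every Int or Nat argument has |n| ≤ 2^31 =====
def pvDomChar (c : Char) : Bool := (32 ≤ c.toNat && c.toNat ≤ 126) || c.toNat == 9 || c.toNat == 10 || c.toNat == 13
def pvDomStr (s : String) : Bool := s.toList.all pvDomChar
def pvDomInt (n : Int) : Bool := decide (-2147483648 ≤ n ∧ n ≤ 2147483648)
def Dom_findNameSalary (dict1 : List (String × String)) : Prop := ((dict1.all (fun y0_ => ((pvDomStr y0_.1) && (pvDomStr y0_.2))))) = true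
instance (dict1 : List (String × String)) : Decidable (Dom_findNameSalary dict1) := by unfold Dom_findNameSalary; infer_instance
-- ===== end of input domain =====

-- B replaces A's scan over all items by two direct key lookups; equivalence is on the return value.
-- ===== PORT A =====
-- for i, v in dict1.items(): if i == 'name': name.append(v) elif i == 'salary': salary.append(v)
def loopBodyA (acc : List String × List String) (iv : String × String) : List String × List String :=
  if iv.1 == "name" then (acc.1 ++ [iv.2], acc.2)
  else if iv.1 == "salary" then (acc.1, acc.2 ++ [iv.2])
  else acc

def findNameSalary (dict1 : List (String × String)) : List String × List String :=
  dict1.foldl loopBodyA ([], [])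

-- ===== PORT B =====
-- dict1['k'] on a dict = first (unique) match in the association list
def bLookup (dict1 : List (String × String)) (k : String) : List String :=
  match dict1.find? (fun p => p.1 == k) with
  | some p => [p.2]
  | none => []

def findNameSalary_alt (dict1 : List (String × String)) : List String × List String :=
  (bLookup dict1 "name", bLookup dict1 "salary")

-- Pre_ excludes association lists with duplicate keys: the Python parameter is a dict, which cannot hold them.
def Pre_findNameSalary (dict1 : List (String × String)) : Prop := (dict1.map Prod.fst).Nodup
instance (dict1 : List (String × String)) : Decidable (Pre_findNameSalary dict1) := by unfold Pre_findNameSalary; infer_instance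
def pvWitness_findNameSalary : (List (String × String)) := [("name", "Ann"), ("salary", "10"), ("age", "3")]

-- ===== PRECONDITION & SPEC =====
def Spec_findNameSalary (dict1 : List (String × String)) (out : List String × List String) : Prop := out = findNameSalary_alt dict1
instance (dict1 : List (String × String)) (out : List String × List String) : Decidable (Spec_findNameSalary dict1 out) := by unfold Spec_findNameSalary; infer_instance

-- ===== CLAIM (what is proved, stated in full; the proofs are below) =====
def Claim_equal_findNameSalary : Prop := ∀ (dict1 : List (String × String)), Dom_findNameSalary dict1 → Pre_findNameSalary dict1 → Spec_findNameSalary dict1 (findNameSalary dict1)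

-- ===== LEMMAS AND PROOFS =====

-- ===== VERDICT (by name: the statement is the Claim_ definition above) =====
-- foldl characterisation: the loop's result is (accumulated names ++ matches, likewise for salary)
theorem findA_foldl (dict1 : List (String × String)) (n s : List String) :
    dict1.foldl loopBodyA (n, s)
    = (n ++ (dict1.filter (fun p => p.1 == "name")).map Prod.snd,
       s ++ (dict1.filter (fun p => p.1 == "salary")).map Prod.snd) := by
  induction dict1 generalizing n s with
  | nil => simp
  | cons hd tl ih =>
    rw [List.foldl_cons]
    by_cases h1 : hd.1 = "name"
    · rw [show loopBodyA (n, s) hd = (n ++ [hd.2], s) from by simp [loopBodyA, h1], ih]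
      simp [List.filter_cons, h1]
    · by_cases h2 : hd.1 = "salary"
      · rw [show loopBodyA (n, s) hd = (n, s ++ [hd.2]) from by simp [loopBodyA, h1, h2], ih]
        simp [List.filter_cons, h1, h2]
      · rw [show loopBodyA (n, s) hd = (n, s) from by simp [loopBodyA, h1, h2], ih]
        simp [List.filter_cons, h1, h2]

-- under unique keys, the filter has at most one element: it is exactly the first find?
theorem filter_eq_lookup (dict1 : List (String × String)) (k : String)
    (hnd : (dict1.map Prod.fst).Nodup) :
    (dict1.filter (fun p => p.1 == k)).map Prod.snd = bLookup dict1 k := by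
  induction dict1 with
  | nil => simp [bLookup]
  | cons hd tl ih =>
    simp only [List.map_cons, List.nodup_cons] at hnd
    by_cases h : hd.1 = k
    · have hk := h
      have : tl.filter (fun p => p.1 == k) = [] := by
        rw [List.filter_eq_nil_iff]
        intro p hp hpk
        exact hnd.1 (by rw [hk, ← show p.1 = k by simpa using hpk]; exact List.mem_map_of_mem hp)
      simp [List.filter_cons, h, bLookup, List.find?_cons, this]
    · simpa [List.filter_cons, h, bLookup, List.find?_cons] using ih hnd.2

theorem findNameSalary_spec : Claim_equal_findNameSalary := by
  intro dict1 _ hpre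
  unfold Spec_findNameSalary findNameSalary findNameSalary_alt
  rw [show (([], []) : List String × List String) = (([] : List String), ([] : List String)) from rfl,
      findA_foldl, filter_eq_lookup _ _ hpre, filter_eq_lookup _ _ hpre]
  simp
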